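-- pv_equiv track=rewrite | github.com/Kianzahrai/ITI1120-Fall2020 | a3/HW3-Solution/a3_part_2-solution.py | weaveop
-- ===== SOURCE A (Python) =====
-- def weaveop(s):
--         '''(str)->str'''
--         if len(s)<=1: return s
--         result=""
--         for i in range(len(s)-1):
--                 left=s[i]
--                 right=s[i+1]
--                 if left.isalpha() and right.isalpha():
--                         result=result+left
--                         if left.isupper():
--                                 result=result+'O'
--                         else:
--                                 result=result+'o'
--
--                         if right.isupper():
--                                 result=result+'P'
--                         else:
--                                 result=result+'p'
--                 else:result=result+left
--         result=result+right
--         return result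
-- ===== SOURCE B (Python) =====
-- def _flush(alpha, run):
--     # turn one maximal same-key run into its output piece
--     if not run:
--         return []
--     if not alpha:
--         return run
--     woven = [x for c, d in zip(run, run[1:])
--                for x in (c, 'O' if c.isupper() else 'o', 'P' if d.isupper() else 'p')]
--     woven.append(run[-1])
--     return woven
--
--
-- def weaveop(s):
--     '''(str)->str'''
--     out = []
--     alpha = False
--     run = []          # current maximal run of chars with equal isalpha() key
--     for c in s:
--         k = c.isalpha()
--         if run and k == alpha:
--             run.append(c)
--         else:
--             out.extend(_flush(alpha, run))
--             alpha = k
--             run = [c]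
--     out.extend(_flush(alpha, run))
--     return ''.join(out)
-- ===== Notes on version B (the rewrite author's own statement) =====
-- stated objective: alternative
-- what changed: B groups the string into maximal runs of equal isalpha() key with a single flush-on-key-change pass and weaves markers only inside alphabetic runs, instead of A's per-index pass that re-tests both neighbours of every adjacent pair.
import Mathlib
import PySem

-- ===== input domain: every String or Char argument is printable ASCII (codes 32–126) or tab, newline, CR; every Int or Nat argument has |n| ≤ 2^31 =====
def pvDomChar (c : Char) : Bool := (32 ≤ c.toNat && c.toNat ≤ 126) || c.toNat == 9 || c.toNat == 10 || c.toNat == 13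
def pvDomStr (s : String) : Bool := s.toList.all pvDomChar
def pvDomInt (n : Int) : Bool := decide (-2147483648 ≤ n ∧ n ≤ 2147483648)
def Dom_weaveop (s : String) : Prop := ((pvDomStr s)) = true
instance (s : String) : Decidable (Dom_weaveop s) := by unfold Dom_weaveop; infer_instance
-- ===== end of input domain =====

-- B groups the string into maximal isalpha()-runs and weaves only inside alphabetic runs,
-- instead of A's per-index adjacent-pair pass; same output, proved equal on Dom.

-- ===== PORT A =====
-- the for-loop of A: state = (result, right), indices i in range(len(s)-1)
def weaveopLoop (cs : List Char) : List Char × Char :=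
  (PySem.List.pyRange 0 ((cs.length : Int) - 1)).foldl
    (fun (st : List Char × Char) (i : Int) =>
      let left := PySem.List.pyGetD cs i ' '
      let right := PySem.List.pyGetD cs (i + 1) ' '
      if PySem.Chars.isalpha left && PySem.Chars.isalpha right then
        (((st.1 ++ [left]) ++ [if PySem.Chars.isupper left then 'O' else 'o']) ++
            [if PySem.Chars.isupper right then 'P' else 'p'], right)
      else
        (st.1 ++ [left], right))
    ([], ' ')

def weaveop (s : String) : String :=
  if PySem.Str.len s ≤ 1 then s
  else
    let r := weaveopLoop s.toList
    String.ofList (r.1 ++ [r.2])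

-- ===== PORT B =====
-- _flush of Source B: one maximal same-key run into its output piece
def weaveopFlush (alpha : Bool) (run : List Char) : List Char :=
  if run = [] then []
  else if alpha = false then run
  else
    ((run.zip run.tail).flatMap
      (fun cd => [cd.1, if PySem.Chars.isupper cd.1 then 'O' else 'o',
                  if PySem.Chars.isupper cd.2 then 'P' else 'p']))
      ++ [PySem.List.pyGetD run (-1) ' ']

-- Source B's loop: state = (out, alpha, run); flush on key change, final flush after the loop
def weaveop_alt (s : String) : String :=
  let st := s.toList.foldl
    (fun (st : List Char × Bool × List Char) (c : Char) =>
      let k := PySem.Chars.isalpha c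
      if st.2.2 ≠ [] ∧ k = st.2.1 then (st.1, st.2.1, st.2.2 ++ [c])
      else (st.1 ++ weaveopFlush st.2.1 st.2.2, k, [c]))
    ([], false, [])
  String.ofList (st.1 ++ weaveopFlush st.2.1 st.2.2)

-- ===== PRECONDITION & SPEC =====
def Spec_weaveop (s : String) (out : String) : Prop := out = weaveop_alt s
instance (s : String) (out : String) : Decidable (Spec_weaveop s out) := by unfold Spec_weaveop; infer_instance

-- ===== CLAIM (what is proved, stated in full; the proofs are below) =====
def Claim_equal_weaveop : Prop := ∀ (s : String), Dom_weaveop s → Spec_weaveop s (weaveop s)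

-- ===== LEMMAS AND PROOFS =====

-- what one adjacent pair contributes to the output (A's branch on the pair)
def pvEmit (p : Char × Char) : List Char :=
  if PySem.Chars.isalpha p.1 && PySem.Chars.isalpha p.2 then
    [p.1, if PySem.Chars.isupper p.1 then 'O' else 'o',
          if PySem.Chars.isupper p.2 then 'P' else 'p']
  else [p.1]

-- reference recursion: weave left to right over adjacent pairs
def pvWeave : List Char → List Char
  | [] => []
  | [c] => [c]
  | c :: d :: rest => pvEmit (c, d) ++ pvWeave (d :: rest)

theorem pvWeave_nil : pvWeave [] = [] := rfl
theorem pvWeave_single (c : Char) : pvWeave [c] = [c] := rfl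
theorem pvWeave_cons_cons (c d : Char) (rest : List Char) :
    pvWeave (c :: d :: rest) = pvEmit (c, d) ++ pvWeave (d :: rest) := rfl

theorem pvGetLastD_irrel {α : Type} (l : List α) (d d' : α) (h : l ≠ []) :
    l.getLastD d = l.getLastD d' := by
  cases l with
  | nil => exact absurd rfl h
  | cons a t => rw [List.getLastD_cons, List.getLastD_cons]

-- ---- B side ----

theorem weaveopFlush_nonalpha (run : List Char) (h : ∀ x ∈ run, PySem.Chars.isalpha x = false) :
    weaveopFlush false run = run := by
  cases run with
  | nil => rfl
  | cons a t => simp [weaveopFlush]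

theorem pvWeave_nonalpha (l : List Char) (h : ∀ x ∈ l, PySem.Chars.isalpha x = false) :
    pvWeave l = l := by
  induction l with
  | nil => rfl
  | cons c t ih =>
    cases t with
    | nil => rfl
    | cons d r =>
      have hc := h c (by simp)
      have ht : ∀ x ∈ d :: r, PySem.Chars.isalpha x = false := fun x hx => h x (by simp [hx])
      rw [pvWeave_cons_cons, ih ht]
      simp [pvEmit, hc]

theorem weaveopFlush_alpha_cons (c d : Char) (g : List Char) :
    weaveopFlush true (c :: d :: g) =
      [c, if PySem.Chars.isupper c then 'O' else 'o',
          if PySem.Chars.isupper d then 'P' else 'p'] ++ weaveopFlush true (d :: g) := by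
  have h1 : (c :: d :: g) ≠ ([] : List Char) := by simp
  have h2 : (d :: g) ≠ ([] : List Char) := by simp
  simp only [weaveopFlush, if_neg (by simp : ¬(c :: d :: g) = ([] : List Char)),
    if_neg (by simp : ¬(d :: g) = ([] : List Char)), if_neg (by simp : ¬true = false)]
  rw [PySem.List.pyGetD_neg_one _ _ h1, PySem.List.pyGetD_neg_one _ _ h2]
  simp [List.getLast_cons, List.zip]

theorem weaveopFlush_alpha_eq_pvWeave (run : List Char) (hne : run ≠ [])
    (h : ∀ x ∈ run, PySem.Chars.isalpha x = true) :
    weaveopFlush true run = pvWeave run := by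
  induction run with
  | nil => exact absurd rfl hne
  | cons c t ih =>
    cases t with
    | nil =>
      simp [weaveopFlush, pvWeave, PySem.List.pyGetD_neg_one]
    | cons d r =>
      have hc := h c (by simp)
      have hd := h d (by simp)
      have ht : ∀ x ∈ d :: r, PySem.Chars.isalpha x = true := fun x hx => h x (by simp [hx])
      rw [weaveopFlush_alpha_cons, pvWeave_cons_cons, ih (by simp) ht]
      simp [pvEmit, hc, hd]

theorem weaveopFlush_eq_pvWeave (a : Bool) (run : List Char) (hne : run ≠ [])
    (h : ∀ x ∈ run, PySem.Chars.isalpha x = a) :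
    weaveopFlush a run = pvWeave run := by
  cases a with
  | false => rw [weaveopFlush_nonalpha run h, pvWeave_nonalpha run h]
  | true => exact weaveopFlush_alpha_eq_pvWeave run hne h

-- crossing a run boundary: the pair (last of run, c) is never both-alpha
theorem pvWeave_append_boundary (run : List Char) (a : Bool) (c : Char) (t : List Char)
    (hne : run ≠ []) (h : ∀ x ∈ run, PySem.Chars.isalpha x = a)
    (hc : PySem.Chars.isalpha c ≠ a) :
    pvWeave (run ++ c :: t) = weaveopFlush a run ++ pvWeave (c :: t) := by
  induction run with
  | nil => exact absurd rfl hne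
  | cons x s ih =>
    cases s with
    | nil =>
      have hx := h x (by simp)
      have hflush : weaveopFlush a [x] = [x] := by
        cases a <;> simp [weaveopFlush, PySem.List.pyGetD_neg_one]
      have hemit : pvEmit (x, c) = [x] := by
        cases a with
        | false => simp [pvEmit, hx]
        | true =>
          have : PySem.Chars.isalpha c = false := by
            cases hcc : PySem.Chars.isalpha c with
            | false => rfl
            | true => exact absurd hcc hc
          simp [pvEmit, this]
      simp only [List.cons_append, List.nil_append, pvWeave_cons_cons, hemit, hflush]
    | cons y r =>
      have hx := h x (by simp)
      have hy := h y (by simp)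
      have hs : ∀ z ∈ y :: r, PySem.Chars.isalpha z = a := fun z hz => h z (by simp [hz])
      have hstep : weaveopFlush a (x :: y :: r) = pvEmit (x, y) ++ weaveopFlush a (y :: r) := by
        cases a with
        | false => simp [weaveopFlush, pvEmit, hx]
        | true => rw [weaveopFlush_alpha_cons]; simp [pvEmit, hx, hy]
      have := ih (by simp) hs
      simp only [List.cons_append] at this ⊢
      rw [pvWeave_cons_cons, this, hstep]
      simp [List.append_assoc]

-- the loop invariant of Source B's single pass
theorem weaveop_alt_invariant (cs : List Char) :
    ∀ (out : List Char) (a : Bool) (run : List Char), run ≠ [] →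
      (∀ x ∈ run, PySem.Chars.isalpha x = a) →
      (let st := cs.foldl
        (fun (st : List Char × Bool × List Char) (c : Char) =>
          let k := PySem.Chars.isalpha c
          if st.2.2 ≠ [] ∧ k = st.2.1 then (st.1, st.2.1, st.2.2 ++ [c])
          else (st.1 ++ weaveopFlush st.2.1 st.2.2, k, [c]))
        (out, a, run)
       st.1 ++ weaveopFlush st.2.1 st.2.2) = out ++ pvWeave (run ++ cs) := by
  induction cs with
  | nil =>
    intro out a run hne hkey
    simp only [List.foldl_nil, List.append_nil]
    rw [weaveopFlush_eq_pvWeave a run hne hkey]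
  | cons c cs ih =>
    intro out a run hne hkey
    by_cases hk : PySem.Chars.isalpha c = a
    · have hcond : run ≠ [] ∧ PySem.Chars.isalpha c = a := ⟨hne, hk⟩
      simp only [List.foldl_cons, if_pos hcond]
      have hkey' : ∀ x ∈ run ++ [c], PySem.Chars.isalpha x = a := by
        intro x hx
        rcases List.mem_append.mp hx with h1 | h1
        · exact hkey x h1
        · simp at h1; subst h1; exact hk
      have := ih out a (run ++ [c]) (by simp) hkey'
      simpa [List.append_assoc] using this
    · have hcond : ¬(run ≠ [] ∧ PySem.Chars.isalpha c = a) := by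
        intro hcc; exact hk hcc.2
      simp only [List.foldl_cons, if_neg hcond]
      have := ih (out ++ weaveopFlush a run) (PySem.Chars.isalpha c) [c] (by simp)
        (by intro x hx; simp at hx; subst hx; rfl)
      rw [this]
      rw [pvWeave_append_boundary run a c cs hne hkey hk]
      simp [List.append_assoc]

theorem weaveop_alt_eq_pvWeave (s : String) :
    weaveop_alt s = String.ofList (pvWeave s.toList) := by
  unfold weaveop_alt
  cases hcs : s.toList with
  | nil => simp [weaveopFlush, pvWeave_nil]
  | cons c cs =>
    simp only [List.foldl_cons]
    rw [if_neg (show ¬(([] : List Char) ≠ [] ∧ PySem.Chars.isalpha c = false) from by simp)]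
    have h0 : ([] : List Char) ++ weaveopFlush false [] = [] := rfl
    rw [h0]
    have hinv := weaveop_alt_invariant cs [] (PySem.Chars.isalpha c) [c] (by simp)
      (by intro x hx; simp at hx; subst hx; rfl)
    simp only at hinv
    rw [hinv]
    rfl

-- ---- A side ----

theorem pvPairs_eq (cs : List Char) :
    (PySem.List.pyRange 0 ((cs.length : Int) - 1)).map
        (fun i => (PySem.List.pyGetD cs i ' ', PySem.List.pyGetD cs (i + 1) ' '))
      = cs.zip cs.tail := by
  cases cs with
  | nil => decide
  | cons c rest =>
    have hlen : ((c :: rest).length : Int) - 1 = (rest.length : Nat) := by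
      simp
    rw [hlen, PySem.List.pyRange_zero_natCast, List.map_map]
    apply List.ext_getElem
    · simp [List.length_zip]
    · intro i h1 h2
      have hi : i < rest.length := by simpa using h1
      simp only [List.getElem_map, List.getElem_range, Function.comp, List.getElem_zip]
      have e1 : PySem.List.pyGetD (c :: rest) (i : Int) ' ' = (c :: rest)[i] := by
        rw [PySem.List.pyGetD_natCast]
        exact List.getD_eq_getElem _ _ (by simp; omega)
      have e2 : PySem.List.pyGetD (c :: rest) ((i : Int) + 1) ' ' = rest[i] := by
        have : ((i : Int) + 1) = ((i + 1 : Nat) : Int) := by push_cast; ring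
        rw [this, PySem.List.pyGetD_natCast]
        have := List.getD_eq_getElem (c :: rest) ' ' (n := i + 1) (by simp; omega)
        simpa using this
      rw [e1, e2]
      simp

theorem pvFoldl_snd (ps : List (Char × Char)) :
    ∀ (x : Char), List.foldl (fun (_ : Char) (p : Char × Char) => p.2) x ps
      = (ps.map Prod.snd).getLastD x := by
  induction ps with
  | nil => intro x; rfl
  | cons p t ih =>
    intro x
    rw [List.foldl_cons, ih p.2, List.map_cons, List.getLastD_cons]

theorem weaveopLoop_eq (cs : List Char) :
    weaveopLoop cs =
      (List.flatMap pvEmit (cs.zip cs.tail), (cs.tail).getLastD ' ') := by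
  unfold weaveopLoop
  have hstep : (fun (st : List Char × Char) (i : Int) =>
      let left := PySem.List.pyGetD cs i ' '
      let right := PySem.List.pyGetD cs (i + 1) ' '
      if PySem.Chars.isalpha left && PySem.Chars.isalpha right then
        (((st.1 ++ [left]) ++ [if PySem.Chars.isupper left then 'O' else 'o']) ++
            [if PySem.Chars.isupper right then 'P' else 'p'], right)
      else
        (st.1 ++ [left], right))
      = fun (st : List Char × Char) (i : Int) =>
          (st.1 ++ pvEmit (PySem.List.pyGetD cs i ' ', PySem.List.pyGetD cs (i + 1) ' '),
           (PySem.List.pyGetD cs i ' ', PySem.List.pyGetD cs (i + 1) ' ').2) := by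
    funext st i
    simp only [pvEmit]
    split_ifs <;> simp
  rw [hstep]
  rw [← List.foldl_map
    (f := fun i => (PySem.List.pyGetD cs i ' ', PySem.List.pyGetD cs (i + 1) ' '))
    (g := fun (st : List Char × Char) (p : Char × Char) => (st.1 ++ pvEmit p, p.2))]
  rw [pvPairs_eq]
  rw [PySem.List.foldl_prod_mk (fun r p => r ++ pvEmit p) (fun _ p => p.2)]
  rw [PySem.List.foldl_append_eq_flatMap pvEmit (cs.zip cs.tail) []]
  rw [pvFoldl_snd]
  rw [List.map_snd_zip (by cases cs <;> simp)]
  simp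

theorem pvWeave_pairs (rest : List Char) :
    ∀ (c : Char), rest ≠ [] →
      List.flatMap pvEmit ((c :: rest).zip rest) ++ [rest.getLastD ' '] = pvWeave (c :: rest) := by
  induction rest with
  | nil => intro c h; exact absurd rfl h
  | cons d r ih =>
    intro c _
    cases r with
    | nil => simp [pvWeave, List.zip]
    | cons e r' =>
      have hzip : (c :: d :: e :: r').zip (d :: e :: r') = (c, d) :: ((d :: e :: r').zip (e :: r')) := by
        simp [List.zip, List.zipWith]
      rw [hzip]
      have hlast : (d :: e :: r').getLastD ' ' = (e :: r').getLastD ' ' := by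
        rw [List.getLastD_cons]
        exact pvGetLastD_irrel _ d ' ' (by simp)
      rw [List.flatMap_cons, hlast, List.append_assoc, ih d (by simp)]
      rfl

theorem weaveop_eq_pvWeave (s : String) :
    weaveop s = String.ofList (pvWeave s.toList) := by
  unfold weaveop
  by_cases h : PySem.Str.len s ≤ 1
  · rw [if_pos h]
    rw [PySem.Str.len_eq] at h
    have hlen : s.toList.length ≤ 1 := by exact_mod_cast h
    cases hcs : s.toList with
    | nil =>
      have hs : s = String.ofList [] := by rw [← hcs, String.ofList_toList]
      rw [hs, pvWeave_nil]
    | cons c t =>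
      cases t with
      | nil =>
        have hs : s = String.ofList [c] := by rw [← hcs, String.ofList_toList]
        rw [hs, pvWeave_single]
      | cons d r => rw [hcs] at hlen; simp at hlen
  · rw [if_neg h]
    rw [PySem.Str.len_eq] at h
    have hlen : 2 ≤ s.toList.length := by omega
    simp only [weaveopLoop_eq]
    cases hcs : s.toList with
    | nil => rw [hcs] at hlen; simp at hlen
    | cons c rest =>
      have hrest : rest ≠ [] := by
        rw [hcs] at hlen
        intro hne; subst hne; simp at hlen
      simp only [List.tail_cons]
      rw [pvWeave_pairs rest c hrest]

-- ===== VERDICT (by name: the statement is the Claim_ definition above) =====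
theorem weaveop_spec : Claim_equal_weaveop := by
  intro s _
  unfold Spec_weaveop
  rw [weaveop_eq_pvWeave, weaveop_alt_eq_pvWeave]
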